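-- pv_equiv track=rewrite | github.com/tomipro/Info-Gral | Parcialito-2-Recuperatorio/IG.21.1C.GT.RPP2.T1.py | dosPares
-- ===== SOURCE A (Python) =====
-- def dosPares(num):
--     cont = 0
--     while num > 0:
--         x = num % 10
--         if x % 2 == 0 and x != 0:
--             cont += 1
--         num = num // 10
--     return True if cont >= 2 else False
-- ===== SOURCE B (Python) =====
-- def dosPares(num):
--     if num <= 0:
--         return False
--     return sum(c in "2468" for c in str(num)) >= 2
-- ===== Notes on version B (the rewrite author's own statement) =====
-- stated objective: idiomatic
-- what changed: B guards nonpositive input and counts the even nonzero digits by scanning the characters of the decimal string of num with a generator sum, instead of A's while-loop extracting digits arithmetically into a manual counter.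
import Mathlib
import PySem

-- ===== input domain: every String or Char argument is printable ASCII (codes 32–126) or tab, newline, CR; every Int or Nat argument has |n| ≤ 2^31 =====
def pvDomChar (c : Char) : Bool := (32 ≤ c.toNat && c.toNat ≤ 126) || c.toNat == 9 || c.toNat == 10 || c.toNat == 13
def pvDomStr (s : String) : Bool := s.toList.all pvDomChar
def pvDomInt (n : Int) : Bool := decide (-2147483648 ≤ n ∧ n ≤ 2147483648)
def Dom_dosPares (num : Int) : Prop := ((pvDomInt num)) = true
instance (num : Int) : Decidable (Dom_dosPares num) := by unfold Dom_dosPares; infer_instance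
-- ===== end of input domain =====

-- B counts even nonzero digits over the characters of the decimal string (guarding nonpositive input first)
-- instead of A's while-loop extracting digits arithmetically into a manual counter; same cost, more idiomatic.

-- ===== PORT A =====
-- the while-loop of A: state (num, cont); per step x = num % 10, bump cont on even nonzero x
def dosParesLoop (num cont : Int) : Int :=
  if h : num > 0 then
    let x := PySem.Int.mod num 10
    dosParesLoop (PySem.Int.floordiv num 10)
      (if PySem.Int.mod x 2 == 0 && !(x == 0) then cont + 1 else cont)
  else cont
termination_by num.toNat
decreasing_by
  rw [PySem.Int.floordiv_eq_ediv_of_pos (by norm_num)]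
  omega

def dosPares (num : Int) : Bool :=
  if dosParesLoop num 0 ≥ 2 then true else false

-- ===== PORT B =====
def dosPares_alt (num : Int) : Bool :=
  if num ≤ 0 then false
  else decide (2 ≤ (PySem.Int.toStr num).toList.countP (fun c => ['2', '4', '6', '8'].contains c))

-- ===== PRECONDITION & SPEC =====
def Spec_dosPares (num : Int) (out : Bool) : Prop := out = dosPares_alt num
instance (num : Int) (out : Bool) : Decidable (Spec_dosPares num out) := by unfold Spec_dosPares; infer_instance

-- ===== CLAIM (what is proved, stated in full; the proofs are below) =====
def Claim_equal_dosPares : Prop := ∀ (num : Int), Dom_dosPares num → Spec_dosPares num (dosPares num)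

-- ===== LEMMAS AND PROOFS =====

-- abstract digit count both sides reduce to
def digitCount (n : Nat) : Nat :=
  if h : n = 0 then 0
  else (if n % 10 ∈ [2, 4, 6, 8] then 1 else 0) + digitCount (n / 10)
termination_by n
decreasing_by omega

lemma cond_char (d : Nat) (hd : d < 10) :
    (['2', '4', '6', '8'].contains (Nat.digitChar d)) = decide (d ∈ [2, 4, 6, 8]) := by
  interval_cases d <;> decide

lemma cond_int (d : Nat) :
    ((PySem.Int.mod (d : Int) 2 == 0) && !((d : Int) == 0)) = decide (d % 2 = 0 ∧ d ≠ 0) := by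
  rw [PySem.Int.mod_eq_emod_of_pos (by norm_num), Bool.eq_iff_iff]
  simp only [Bool.and_eq_true, beq_iff_eq, Bool.not_eq_true', beq_eq_false_iff_ne, ne_eq,
    decide_eq_true_eq]
  omega

lemma loop_eq (n : Nat) : ∀ cont : Int, dosParesLoop (n : Int) cont = cont + (digitCount n : Int) := by
  induction n using Nat.strong_induction_on with
  | _ n ih =>
    intro cont
    unfold dosParesLoop
    by_cases h0 : 0 < n
    · have hpos : (n : Int) > 0 := by exact_mod_cast h0
      have hmod : PySem.Int.mod (n : Int) 10 = ((n % 10 : Nat) : Int) := by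
        exact_mod_cast PySem.Int.mod_natCast n 10
      have hdiv : PySem.Int.floordiv (n : Int) 10 = ((n / 10 : Nat) : Int) := by
        exact_mod_cast PySem.Int.floordiv_natCast n 10
      simp only [hpos, dif_pos, hmod, hdiv]
      rw [cond_int (n % 10), ih (n / 10) (Nat.div_lt_self h0 (by norm_num))]
      have hdc : digitCount n = (if n % 10 ∈ [2, 4, 6, 8] then 1 else 0) + digitCount (n / 10) := by
        conv_lhs => rw [digitCount]
        simp [h0.ne']
      rw [hdc]
      have hcond : (n % 10 % 2 = 0 ∧ n % 10 ≠ 0) ↔ n % 10 ∈ [2, 4, 6, 8] := by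
        simp only [List.mem_cons, List.not_mem_nil, or_false]
        omega
      simp only [hcond]
      by_cases hmem : n % 10 ∈ [2, 4, 6, 8] <;> simp [hmem] <;> push_cast <;> omega
    · have hng : ¬ ((n : Int) > 0) := by omega
      simp only [hng, dif_neg, not_false_eq_true]
      have : n = 0 := by omega
      subst this
      rw [digitCount]
      simp

lemma core_count : ∀ (fuel n : Nat) (ds : List Char), n < fuel →
    (Nat.toDigitsCore 10 fuel n ds).countP (fun c => ['2', '4', '6', '8'].contains c)
      = (if n % 10 ∈ [2, 4, 6, 8] then 1 else 0) + digitCount (n / 10)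
        + ds.countP (fun c => ['2', '4', '6', '8'].contains c) := by
  intro fuel
  induction fuel with
  | zero => intro n ds h; omega
  | succ f ihf =>
    intro n ds h
    rw [Nat.toDigitsCore]
    have hlt : n % 10 < 10 := Nat.mod_lt n (by norm_num)
    by_cases hq : n / 10 = 0
    · simp only [hq, if_pos]
      rw [List.countP_cons]
      rw [digitCount]
      simp only [hq]
      rw [cond_char (n % 10) hlt]
      by_cases hmem : n % 10 ∈ [2, 4, 6, 8] <;> simp [hmem] <;> omega
    · simp only [hq, if_neg, not_false_eq_true]
      have hql : n / 10 < f := by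
        have h1 : n / 10 < n := Nat.div_lt_self (by omega) (by norm_num)
        omega
      rw [ihf (n / 10) _ hql, List.countP_cons, cond_char (n % 10) hlt]
      have hdc : digitCount (n / 10)
          = (if (n / 10) % 10 ∈ [2, 4, 6, 8] then 1 else 0) + digitCount (n / 10 / 10) := by
        rw [digitCount]; simp [hq]
      rw [hdc]
      by_cases hmem : n % 10 ∈ [2, 4, 6, 8] <;> simp [hmem] <;> omega

lemma alt_count (n : Nat) (h : 0 < n) :
    (PySem.Int.toStr (n : Int)).toList.countP (fun c => ['2', '4', '6', '8'].contains c) = digitCount n := by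
  rw [PySem.Int.toList_toStr]
  have hneg : ¬ ((n : Int) < 0) := by omega
  simp only [PySem.Int.toChars, hneg, if_neg, not_false_eq_true, Int.toNat_natCast]
  rw [Nat.toDigits]
  rw [core_count (n + 1) n [] (by omega)]
  conv_rhs => rw [digitCount]
  simp [h.ne']

-- ===== VERDICT (by name: the statement is the Claim_ definition above) =====
theorem dosPares_spec : Claim_equal_dosPares := by
  intro num _
  unfold Spec_dosPares dosPares dosPares_alt
  by_cases h : num ≤ 0
  · have hng : ¬ (num > 0) := by omega
    rw [dosParesLoop]
    simp [hng, h]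
  · have hnle : ¬ (num ≤ 0) := h
    have h : 0 < num := by omega
    obtain ⟨n, hn⟩ : ∃ n : Nat, num = (n : Int) := ⟨num.toNat, by omega⟩
    subst hn
    have hn0 : 0 < n := by exact_mod_cast h
    rw [loop_eq n 0, alt_count n hn0]
    simp only [hnle, if_neg, not_false_eq_true]
    by_cases h2 : 2 ≤ digitCount n
    · have hge : (0 : Int) + (digitCount n : Int) ≥ 2 := by omega
      simp [hge, h2]
    · have hge : ¬ ((0 : Int) + (digitCount n : Int) ≥ 2) := by omega
      simp [hge, h2]
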